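-- pv_equiv track=rewrite | github.com/547343578/SAR | proyecto/SAR_lib.py | and_posting
-- ===== SOURCE A (Python) =====
-- def and_posting(p1, p2):
--     """
--     NECESARIO PARA TODAS LAS VERSIONES
--
--     Calcula el AND de dos posting list de forma EFICIENTE
--
--     param:  "p1", "p2": posting lists sobre las que calcular
--
--
--     return: posting list con los newid incluidos en p1 y p2
--
--     """
--
--     res = []
--     i = 0
--     j = 0
--     p1.sort()
--     p2.sort()
--     while i < len(p1) and j < len(p2):
--         if p1[i] == p2[j]:
--             res.append(p1[i])
--             i += 1
--             j += 1
--         elif p1[i] < p2[j]: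
--             i += 1
--         else:
--             j += 1
--     return res
-- ===== SOURCE B (Python) =====
-- def and_posting(p1, p2):
--     p1.sort()
--     p2.sort()
--     c = {}
--     for x in p2:
--         c[x] = c.get(x, 0) + 1
--     res = []
--     for x in p1:
--         if c.get(x, 0) > 0:
--             c[x] = c[x] - 1
--             res.append(x)
--     return res
-- ===== Notes on version B (the rewrite author's own statement) =====
-- stated objective: alternative
-- what changed: Replaces the two-pointer merge over both sorted lists by a hash-counter built from p2 in one pass, then a single filtering pass over sorted p1 that consumes counts, giving the same sorted intersection with multiplicities.
import Mathlib
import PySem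

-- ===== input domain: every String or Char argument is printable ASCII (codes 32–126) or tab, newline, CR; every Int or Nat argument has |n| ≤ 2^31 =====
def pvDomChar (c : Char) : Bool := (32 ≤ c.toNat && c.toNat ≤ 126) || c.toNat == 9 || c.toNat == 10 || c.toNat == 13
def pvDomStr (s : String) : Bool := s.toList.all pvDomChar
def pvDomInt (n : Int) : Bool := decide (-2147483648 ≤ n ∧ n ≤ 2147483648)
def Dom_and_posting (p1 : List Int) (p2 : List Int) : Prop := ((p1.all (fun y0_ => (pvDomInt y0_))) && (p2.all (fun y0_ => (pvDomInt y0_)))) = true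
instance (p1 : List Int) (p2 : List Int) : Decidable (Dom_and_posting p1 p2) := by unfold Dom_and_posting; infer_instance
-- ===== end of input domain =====

-- B replaces A's two-pointer merge by a counter of p2 plus one filtering pass over sorted p1
-- (objective: alternative). Both Pythons sort p1 and p2 IN PLACE; the equivalence proved here
-- is about the return value only.

-- ===== PORT A =====
-- the `while i < len(p1) and j < len(p2)` two-pointer loop over the two sorted lists
def pvALoop : List Int → List Int → List Int
  | [], _ => []
  | _ :: _, [] => []
  | a :: as, b :: bs =>
    if a = b then a :: pvALoop as bs
    else if a < b then pvALoop as (b :: bs)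
    else pvALoop (a :: as) bs
termination_by xs ys => xs.length + ys.length

def and_posting (p1 : List Int) (p2 : List Int) : List Int :=
  pvALoop (PySem.List.sorted p1 (fun x => x) false) (PySem.List.sorted p2 (fun x => x) false)

-- ===== PORT B =====
-- `for x in p2: c[x] = c.get(x, 0) + 1`
def pvBCount (p2 : List Int) : PySem.Dict Int Int :=
  p2.foldl (fun c x => c.insert x (c.getD x 0 + 1)) PySem.Dict.empty

-- `for x in p1: if c.get(x, 0) > 0: c[x] = c[x] - 1; res.append(x)`
def pvBFilter : List Int → PySem.Dict Int Int → List Int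
  | [], _ => []
  | x :: xs, c =>
    if c.getD x 0 > 0 then x :: pvBFilter xs (c.insert x (c.getD x 0 - 1))
    else pvBFilter xs c

def and_posting_alt (p1 : List Int) (p2 : List Int) : List Int :=
  pvBFilter (PySem.List.sorted p1 (fun x => x) false)
    (pvBCount (PySem.List.sorted p2 (fun x => x) false))

-- ===== PRECONDITION & SPEC =====
def Spec_and_posting (p1 : List Int) (p2 : List Int) (out : List Int) : Prop := out = and_posting_alt p1 p2
instance (p1 : List Int) (p2 : List Int) (out : List Int) : Decidable (Spec_and_posting p1 p2 out) := by unfold Spec_and_posting; infer_instance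

-- ===== CLAIM (what is proved, stated in full; the proofs are below) =====
def Claim_equal_and_posting : Prop := ∀ (p1 : List Int) (p2 : List Int), Dom_and_posting p1 p2 → Spec_and_posting p1 p2 (and_posting p1 p2)

-- ===== LEMMAS AND PROOFS =====

-- reference multiset intersection, in the order of the first list
def pvInter : List Int → List Int → List Int
  | [], _ => []
  | x :: xs, ys => if x ∈ ys then x :: pvInter xs (ys.erase x) else pvInter xs ys

lemma pvBCount_eq_counter (p2 : List Int) : pvBCount p2 = PySem.Dict.counter p2 :=
  PySem.Dict.foldl_insert_getD_add_one_eq_counter p2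

lemma pvBFilter_eq_inter : ∀ (xs ys : List Int) (c : PySem.Dict Int Int),
    (∀ k, c.getD k 0 = (ys.count k : Int)) → pvBFilter xs c = pvInter xs ys := by
  intro xs
  induction xs with
  | nil => intro ys c _; simp [pvBFilter, pvInter]
  | cons x xs ih =>
    intro ys c hc
    by_cases hx : x ∈ ys
    · have hcnt : 0 < ys.count x := List.count_pos_iff.mpr hx
      have hpos : c.getD x 0 > 0 := by rw [hc]; exact_mod_cast hcnt
      have hrec : ∀ k, (c.insert x (c.getD x 0 - 1)).getD k 0 = ((ys.erase x).count k : Int) := by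
        intro k
        by_cases hk : k = x
        · subst hk
          rw [PySem.Dict.getD_insert_self, hc, List.count_erase_self]
          omega
        · rw [PySem.Dict.getD_insert_of_ne c _ _ hk, hc,
            List.count_erase_of_ne hk]
      simp only [pvBFilter, pvInter, if_pos hpos, if_pos hx]
      rw [ih (ys.erase x) _ hrec]
    · have hz : c.getD x 0 = 0 := by
        rw [hc]; simp [List.count_eq_zero_of_not_mem hx]
      simp only [pvBFilter, pvInter, hz, if_neg hx]
      norm_num
      exact ih ys c hc

lemma pvInter_cons_gt : ∀ (zs ys : List Int) (y : Int),
    (∀ z ∈ zs, y < z) → pvInter zs (y :: ys) = pvInter zs ys := by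
  intro zs
  induction zs with
  | nil => intro ys y _; simp [pvInter]
  | cons z zs ih =>
    intro ys y h
    have hzy : z ≠ y := by have := h z (by simp); omega
    have hmem : z ∈ y :: ys ↔ z ∈ ys := by simp [hzy]
    by_cases hz : z ∈ ys
    · have herase : (y :: ys).erase z = y :: ys.erase z := by
        rw [List.erase_cons_tail (by simp [hzy.symm])]
      simp only [pvInter, hmem, if_pos hz, herase]
      rw [ih (ys.erase z) y (fun w hw => h w (by simp [hw]))]
    · simp only [pvInter, hmem, if_neg hz]
      exact ih ys y (fun w hw => h w (by simp [hw]))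

lemma pvInter_nil : ∀ (xs : List Int), pvInter xs [] = [] := by
  intro xs; induction xs with
  | nil => rfl
  | cons x xs ih => simp [pvInter, ih]

lemma pvALoop_eq_inter : ∀ (xs ys : List Int),
    xs.Pairwise (· ≤ ·) → ys.Pairwise (· ≤ ·) → pvALoop xs ys = pvInter xs ys := by
  intro xs ys
  induction xs, ys using pvALoop.induct with
  | case1 ys => intro _ _; simp [pvALoop, pvInter]
  | case2 x xs => intro _ _; simp [pvALoop, pvInter, pvInter_nil]
  | case3 as b bs ih =>
    intro hxs hys
    have herase : (b :: bs).erase b = bs := by simp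
    simp only [pvALoop, pvInter, List.mem_cons, true_or, if_true, herase]
    rw [ih hxs.of_cons hys.of_cons]
  | case4 a as b bs hne hlt ih =>
    intro hxs hys
    have hna : a ∉ b :: bs := by
      intro hmem
      rcases List.mem_cons.mp hmem with h | h
      · exact hne h
      · have := (List.pairwise_cons.mp hys).1 a h; omega
    simp only [pvALoop, pvInter, if_neg hne, if_pos hlt, if_neg hna]
    exact ih hxs.of_cons hys
  | case5 a as b bs hne hnlt ih =>
    intro hxs hys
    have hba : b < a := by omega
    have hgt : ∀ z ∈ a :: as, b < z := by
      intro z hz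
      rcases List.mem_cons.mp hz with h | h
      · omega
      · have := (List.pairwise_cons.mp hxs).1 z h; omega
    simp only [pvALoop, if_neg hne, if_neg hnlt]
    rw [ih hxs hys.of_cons, pvInter_cons_gt _ _ _ hgt]

-- ===== VERDICT (by name: the statement is the Claim_ definition above) =====
theorem and_posting_spec : Claim_equal_and_posting := by
  intro p1 p2 _
  unfold Spec_and_posting and_posting and_posting_alt
  rw [pvALoop_eq_inter _ _ (PySem.List.sorted_pairwise p1 (fun x => x))
      (PySem.List.sorted_pairwise p2 (fun x => x))]
  rw [pvBCount_eq_counter]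
  exact (pvBFilter_eq_inter _ _ _ (fun k => PySem.Dict.getD_counter _ k)).symm
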